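-- pv_equiv track=rewrite | github.com/4g/dcool | src/modelling/dc_defs.py | number_free_params
-- ===== SOURCE A (Python) =====
-- def number_free_params(all_params):
--     numeric_chars = ['m', 'n', 'k']
--     wrap = lambda x: "{" + x + "}"
--     unique_params = {}
--     for param in all_params:
--         tmp = ""
--         n_digits = 0
--         d_map = {}
--         for c in param:
--             if c.isdigit():
--                 char_rep = numeric_chars[n_digits]
--                 tmp += wrap(char_rep)
--                 d_map[char_rep] = c
--                 n_digits += 1
--             else:
--                 tmp += c
--         unique_params[tmp] = unique_params.get(tmp, {})
--         for c in d_map: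
--             unique_params[tmp][c] = unique_params[tmp].get(c, [])
--             unique_params[tmp][c].append(d_map[c])
--
--     return unique_params
-- ===== SOURCE B (Python) =====
-- def number_free_params(all_params):
--     numeric_chars = ['m', 'n', 'k']
--
--     def parse(param):
--         tmpl = []
--         digs = []
--         for c in param:
--             if c.isdigit():
--                 tmpl.append("{" + numeric_chars[len(digs)] + "}")
--                 digs.append(c)
--             else:
--                 tmpl.append(c)
--         return "".join(tmpl), digs
--
--     parsed = [parse(p) for p in all_params]
--     result = {}
--     for tmpl, _ in parsed:
--         if tmpl in result:
--             continue
--         rows = [d for t, d in parsed if t == tmpl]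
--         width = max((len(d) for d in rows), default=0)
--         result[tmpl] = {numeric_chars[i]: [d[i] for d in rows if len(d) > i]
--                         for i in range(width)}
--     return result
-- ===== Notes on version B (the rewrite author's own statement) =====
-- stated objective: alternative
-- what changed: A accumulates the nested dict in one pass, mutating inner per-key lists while it scans each param; B first maps every param to a (template, digit-row) pair and then, for each first-seen template, rescans that list to gather the group's rows and builds each inner dict directly by column extraction ([d[i] for d in rows if len(d) > i] over range(max row length)) with no dict mutation/accumulation.
import Mathlib
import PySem

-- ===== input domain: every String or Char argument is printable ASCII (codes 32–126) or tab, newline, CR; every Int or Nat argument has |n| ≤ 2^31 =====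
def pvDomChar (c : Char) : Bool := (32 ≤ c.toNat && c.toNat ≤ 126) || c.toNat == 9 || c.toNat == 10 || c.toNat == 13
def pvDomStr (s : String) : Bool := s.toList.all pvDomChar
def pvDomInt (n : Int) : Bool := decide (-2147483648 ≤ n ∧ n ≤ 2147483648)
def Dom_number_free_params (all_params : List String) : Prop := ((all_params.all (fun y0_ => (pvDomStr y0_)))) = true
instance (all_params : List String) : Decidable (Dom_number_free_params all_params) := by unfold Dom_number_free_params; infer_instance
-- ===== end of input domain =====

-- B replaces A's single-pass nested-dict accumulation by: parse every param to a (template, digit-row)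
-- pair, then for each first-seen template rescan that list for the group's rows and build the inner
-- dict directly by column extraction (alternative structure, no accumulating dict mutation).

-- ===== PORT A =====
-- numeric_chars = ['m', 'n', 'k']
def nfpChars : List String := ["m", "n", "k"]

-- A's inner character loop; state = (tmp as chars, n_digits, d_map).
-- numeric_chars[n_digits] is ported as pyGetD with default "": Python raises IndexError there,
-- which happens only outside Pre_ (a param with more than 3 digit characters).
def nfpScanA (st : List Char × Int × PySem.Dict String String) (c : Char) :
    List Char × Int × PySem.Dict String String :=
  if PySem.Chars.isdigit c then
    let r := PySem.List.pyGetD nfpChars st.2.1 ""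
    (st.1 ++ '{' :: r.toList ++ ['}'], st.2.1 + 1, st.2.2.insert r (String.ofList [c]))
  else
    (st.1 ++ [c], st.2.1, st.2.2)

-- A's loop body for one param: register the template, then for c in d_map append d_map[c]
-- (the two Python statements 'unique_params[tmp][c] = unique_params[tmp].get(c, [])' and
-- 'unique_params[tmp][c].append(d_map[c])' combine into one 'modify cv.1 [] (· ++ [d_map[cv.1]])').
def nfpStepA (u : PySem.Dict String (PySem.Dict String (List String))) (param : String) :
    PySem.Dict String (PySem.Dict String (List String)) :=
  let s := param.toList.foldl nfpScanA ([], 0, PySem.Dict.mk [])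
  let tmp := String.ofList s.1
  let u1 := u.insert tmp (u.getD tmp (PySem.Dict.mk []))
  s.2.2.items.foldl (fun u cv =>
    u.insert tmp ((u.getD tmp (PySem.Dict.mk [])).modify cv.1 [] (· ++ [s.2.2.getD cv.1 ""]))) u1

def number_free_params (all_params : List String) : List (String × List (String × List String)) :=
  ((all_params.foldl nfpStepA (PySem.Dict.mk [])).items.map (fun p => (p.1, p.2.items)))

-- ===== PORT B =====
-- B's parse loop: state = (tmpl as chars, digs); numeric_chars[len(digs)] again via pyGetD
-- (IndexError only outside Pre_).
def nfpScanB (st : List Char × List Char) (c : Char) : List Char × List Char :=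
  if PySem.Chars.isdigit c then
    (st.1 ++ '{' :: (PySem.List.pyGetD nfpChars (st.2.length : Int) "").toList ++ ['}'], st.2 ++ [c])
  else
    (st.1 ++ [c], st.2)

def nfpRaw (param : String) : List Char × List Char :=
  param.toList.foldl nfpScanB ([], [])

-- parse(param) = ("".join(tmpl), digs)
def nfpParse (param : String) : String × List Char :=
  (String.ofList (nfpRaw param).1, (nfpRaw param).2)

-- [d[i] for d in rows if len(d) > i]  (the index is guarded by the filter, so getD's default is dead)
def nfpCol (rows : List (List Char)) (i : Nat) : List String :=
  (rows.filter (fun d => decide (i < d.length))).map (fun d => String.ofList [d.getD i ' '])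

-- {numeric_chars[i]: [d[i] for d in rows if len(d) > i] for i in range(width)},
-- width = max((len(d) for d in rows), default=0)
def nfpInnerB (rows : List (List Char)) : PySem.Dict String (List String) :=
  let width := ((PySem.List.max? (rows.map (fun d => (d.length : Int))) (fun x => x)).getD 0).toNat
  PySem.Dict.mk ((List.range width).map (fun (i : Nat) => (PySem.List.pyGetD nfpChars (i : Int) "", nfpCol rows i)))

def number_free_params_alt (all_params : List String) : List (String × List (String × List String)) :=
  let parsed := all_params.map nfpParse
  let result := parsed.foldl (fun r td =>
      if r.contains td.1 then r
      else r.insert td.1 (nfpInnerB ((parsed.filter (fun p => p.1 == td.1)).map (·.2))))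
    (PySem.Dict.mk [])
  result.items.map (fun p => (p.1, p.2.items))

-- ===== PRECONDITION & SPEC =====
-- Pre_ excludes exactly the inputs on which the Python A raises IndexError: a param with more
-- than 3 digit characters (numeric_chars[n_digits] with n_digits ≥ 3).
def Pre_number_free_params (all_params : List String) : Prop :=
  ∀ p ∈ all_params, p.toList.countP PySem.Chars.isdigit ≤ 3

instance (all_params : List String) : Decidable (Pre_number_free_params all_params) := by
  unfold Pre_number_free_params; infer_instance

def pvWitness_number_free_params : List String := ["conv2d_3x3", "stride1", "bias"]

def Spec_number_free_params (all_params : List String) (out : List (String × List (String × List String))) : Prop := out = number_free_params_alt all_params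
instance (all_params : List String) (out : List (String × List (String × List String))) : Decidable (Spec_number_free_params all_params out) := by unfold Spec_number_free_params; infer_instance

-- ===== CLAIM (what is proved, stated in full; the proofs are below) =====
def Claim_equal_number_free_params : Prop := ∀ (all_params : List String), Dom_number_free_params all_params → Pre_number_free_params all_params → Spec_number_free_params all_params (number_free_params all_params)

-- ===== LEMMAS AND PROOFS =====

-- d_map of a param whose digit list is d, as an association list: numeric_chars[i] ↦ str(d[i]).
def nfpPairs (d : List Char) : List (String × String) :=
  (PySem.List.enumerate d).map (fun iv => (PySem.List.pyGetD nfpChars iv.1 "", String.ofList [iv.2]))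

-- A's per-bucket accumulation (what A's nested mutation amounts to on one template's rows).
def nfpInner (ds : List (List Char)) : PySem.Dict String (List String) :=
  ds.foldl (fun inn d => (nfpPairs d).foldl (fun inn cv => inn.modify cv.1 [] (· ++ [cv.2])) inn)
    (PySem.Dict.mk [])

-- A's nested dict rebuilt from the per-template buckets.
def nfpRender (b : PySem.Dict String (List (List Char))) :
    PySem.Dict String (PySem.Dict String (List String)) :=
  PySem.Dict.mk (b.items.map (fun p => (p.1, nfpInner p.2)))

-- width of a bucket, as a Nat
def nfpW (rows : List (List Char)) : Nat := rows.foldl (fun a d => max a d.length) 0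

-- the inner dict of a bucket, written as an explicit table
def nfpTable (rows : List (List Char)) : List (String × List String) :=
  (List.range (nfpW rows)).map (fun (i : Nat) => (PySem.List.pyGetD nfpChars (i : Int) "", nfpCol rows i))

theorem nfpRaw_snd (cs : List Char) (st : List Char × List Char) :
    (cs.foldl nfpScanB st).2 = st.2 ++ cs.filter PySem.Chars.isdigit := by
  induction cs generalizing st with
  | nil => simp
  | cons c cs ih =>
    rw [List.foldl_cons, ih]
    by_cases hc : PySem.Chars.isdigit c <;> simp [nfpScanB, hc]

theorem nfpPairs_append (d : List Char) (c : Char) :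
    nfpPairs (d ++ [c])
      = nfpPairs d ++ [(PySem.List.pyGetD nfpChars (d.length : Int) "", String.ofList [c])] := by
  simp [nfpPairs, PySem.List.enumerate_append, PySem.List.enumerate_cons]

-- while at most 3 digits were seen, the next char_rep is a fresh key of d_map
theorem nfpFresh (d : List Char) (h : d.length ≤ 2) :
    (PySem.Dict.mk (nfpPairs d)).contains (PySem.List.pyGetD nfpChars (d.length : Int) "") = false := by
  match d, h with
  | [], _ => decide
  | [a], _ => simp [nfpPairs, PySem.List.enumerate_cons, PySem.Dict.contains_mk]; decide
  | [a, b], _ => simp [nfpPairs, PySem.List.enumerate_cons, PySem.Dict.contains_mk]; decide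

theorem nfpNodup (d : List Char) (h : d.length ≤ 3) :
    (PySem.Dict.mk (nfpPairs d)).keys.Nodup := by
  match d, h with
  | [], _ => decide
  | [a], _ => simp [nfpPairs, PySem.List.enumerate_cons, PySem.Dict.keys]
  | [a, b], _ => simp [nfpPairs, PySem.List.enumerate_cons, PySem.Dict.keys]; decide
  | [a, b, c], _ => simp [nfpPairs, PySem.List.enumerate_cons, PySem.Dict.keys]; decide

-- the two character scans agree: same template, n_digits = len(digits), d_map = nfpPairs digits
theorem nfpScan_eq (cs : List Char) (t0 d0 : List Char)
    (h : d0.length + cs.countP PySem.Chars.isdigit ≤ 3) :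
    cs.foldl nfpScanA (t0, (d0.length : Int), PySem.Dict.mk (nfpPairs d0)) =
      ((cs.foldl nfpScanB (t0, d0)).1,
       ((cs.foldl nfpScanB (t0, d0)).2.length : Int),
       PySem.Dict.mk (nfpPairs (cs.foldl nfpScanB (t0, d0)).2)) := by
  induction cs generalizing t0 d0 with
  | nil => simp
  | cons c cs ih =>
    by_cases hc : PySem.Chars.isdigit c
    · have hcount : (c :: cs).countP PySem.Chars.isdigit = cs.countP PySem.Chars.isdigit + 1 := by
        simp [hc]
      have hlen : d0.length ≤ 2 := by omega
      have hins : (PySem.Dict.mk (nfpPairs d0)).insert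
            (PySem.List.pyGetD nfpChars (d0.length : Int) "") (String.ofList [c])
          = PySem.Dict.mk (nfpPairs (d0 ++ [c])) := by
        apply PySem.Dict.ext
        rw [PySem.Dict.items_insert_of_not_contains _ _ (nfpFresh d0 hlen), nfpPairs_append]
      rw [List.foldl_cons, List.foldl_cons]
      simp only [nfpScanA, nfpScanB, hc, if_true]
      rw [hins]
      have hlen1 : ((d0.length : Int) + 1) = ((d0 ++ [c]).length : Int) := by simp
      rw [hlen1]
      exact ih (t0 ++ '{' :: (PySem.List.pyGetD nfpChars (d0.length : Int) "").toList ++ ['}'])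
        (d0 ++ [c]) (by simp; omega)
    · rw [List.foldl_cons, List.foldl_cons]
      have := ih (t0 ++ [c]) d0 (by rw [List.countP_cons] at h; simpa [hc] using h)
      simpa [nfpScanA, nfpScanB, hc] using this

-- A's d_map loop repeatedly reinserts at the template key; it collapses to one insert
theorem nfpCollapse (l : List (String × String)) (dm : PySem.Dict String String)
    (hl : ∀ cv ∈ l, dm.getD cv.1 "" = cv.2)
    (U : PySem.Dict String (PySem.Dict String (List String))) (t : String)
    (inn0 : PySem.Dict String (List String)) :
    l.foldl (fun u cv =>
        u.insert t ((u.getD t (PySem.Dict.mk [])).modify cv.1 [] (· ++ [dm.getD cv.1 ""])))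
      (U.insert t inn0)
    = U.insert t (l.foldl (fun inn cv => inn.modify cv.1 [] (· ++ [cv.2])) inn0) := by
  induction l generalizing inn0 with
  | nil => rfl
  | cons cv l ih =>
    rw [List.foldl_cons, PySem.Dict.getD_insert_self, PySem.Dict.insert_insert_self,
      hl cv List.mem_cons_self, List.foldl_cons]
    exact ih (fun cv h => hl cv (List.mem_cons_of_mem _ h)) _

theorem nfpRender_get? (l : List (String × List (List Char))) (k : String) :
    (PySem.Dict.mk (l.map (fun p => (p.1, nfpInner p.2)))).get? k
      = ((PySem.Dict.mk l).get? k).map nfpInner := by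
  induction l with
  | nil => simp [PySem.Dict.get?]
  | cons p l ih =>
    rw [List.map_cons, PySem.Dict.get?_mk_cons, PySem.Dict.get?_mk_cons]
    by_cases hp : p.1 == k <;> simp [hp, ih]

theorem nfpRender_getD (b : PySem.Dict String (List (List Char))) (t : String) :
    (nfpRender b).getD t (PySem.Dict.mk []) = nfpInner (b.getD t []) := by
  unfold nfpRender
  rw [PySem.Dict.getD_eq_get?_getD, PySem.Dict.getD_eq_get?_getD, nfpRender_get? b.items t]
  cases h : (PySem.Dict.mk b.items).get? t <;> simp [nfpInner]

theorem nfpRender_contains (b : PySem.Dict String (List (List Char))) (t : String) :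
    (nfpRender b).contains t = b.contains t := by
  rw [PySem.Dict.contains_eq_isSome_get?, PySem.Dict.contains_eq_isSome_get?]
  unfold nfpRender
  rw [nfpRender_get? b.items t]
  cases h : (PySem.Dict.mk b.items).get? t <;> simp_all

theorem nfpRender_insert (b : PySem.Dict String (List (List Char))) (t : String)
    (v : List (List Char)) :
    (nfpRender b).insert t (nfpInner v) = nfpRender (b.insert t v) := by
  apply PySem.Dict.ext
  by_cases hc : b.contains t
  · rw [PySem.Dict.items_insert_of_contains _ _ ((nfpRender_contains b t).trans hc),
      nfpRender, nfpRender, PySem.Dict.items_insert_of_contains _ _ hc]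
    simp only [List.map_map]
    apply List.map_congr_left
    intro p _
    by_cases hp : p.1 = t <;> simp [hp]
  · rw [PySem.Dict.items_insert_of_not_contains _ _
        (by rw [nfpRender_contains]; exact eq_false_of_ne_true hc),
      nfpRender, nfpRender, PySem.Dict.items_insert_of_not_contains _ _ (eq_false_of_ne_true hc)]
    simp

theorem nfpInner_append (ds : List (List Char)) (d : List Char) :
    nfpInner (ds ++ [d])
      = (nfpPairs d).foldl (fun inn cv => inn.modify cv.1 [] (· ++ [cv.2])) (nfpInner ds) := by
  unfold nfpInner
  rw [List.foldl_append, List.foldl_cons, List.foldl_nil]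

-- one step of A on the rendered state = rendering one step of the bucketing
theorem nfpStep_eq (b : PySem.Dict String (List (List Char))) (param : String)
    (h : param.toList.countP PySem.Chars.isdigit ≤ 3) :
    nfpStepA (nfpRender b) param
      = nfpRender (b.modify (nfpParse param).1 [] (· ++ [(nfpParse param).2])) := by
  have hs : param.toList.foldl nfpScanA ([], 0, PySem.Dict.mk []) =
      ((nfpRaw param).1, ((nfpRaw param).2.length : Int),
        PySem.Dict.mk (nfpPairs (nfpRaw param).2)) := by
    have := nfpScan_eq param.toList [] [] (by simpa using h)
    simpa [nfpRaw, show nfpPairs [] = [] from rfl] using this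
  have hdlen : (nfpRaw param).2.length ≤ 3 := by
    have := nfpRaw_snd param.toList ([], [])
    simp only [nfpRaw, this, List.nil_append]
    rw [← List.countP_eq_length_filter]; exact h
  simp only [nfpStepA]
  rw [hs]; dsimp only
  refine Eq.trans (nfpCollapse (nfpPairs (nfpRaw param).2)
      (PySem.Dict.mk (nfpPairs (nfpRaw param).2)) ?_ (nfpRender b)
      (String.ofList (nfpRaw param).1)
      ((nfpRender b).getD (String.ofList (nfpRaw param).1) (PySem.Dict.mk []))) ?_
  · rintro ⟨c1, v1⟩ hcv
    exact PySem.Dict.getD_of_mem_items _ hcv (nfpNodup _ hdlen) ""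
  · rw [nfpRender_getD, ← nfpInner_append]
    show _ = nfpRender (b.insert (nfpParse param).1 _)
    simp only [nfpParse]
    rw [← nfpRender_insert]

theorem nfpFold_eq (ps : List String) (b : PySem.Dict String (List (List Char)))
    (h : ∀ p ∈ ps, p.toList.countP PySem.Chars.isdigit ≤ 3) :
    ps.foldl nfpStepA (nfpRender b)
      = nfpRender (ps.foldl (fun b param =>
          b.modify (nfpParse param).1 [] (· ++ [(nfpParse param).2])) b) := by
  induction ps generalizing b with
  | nil => rfl
  | cons p ps ih =>
    rw [List.foldl_cons, nfpStep_eq b p (h p List.mem_cons_self), List.foldl_cons]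
    exact ih _ (fun q hq => h q (List.mem_cons_of_mem _ hq))

-- B's width computation equals the Nat running maximum
theorem nfpCastFold (rs : List (List Char)) (a : Nat) :
    (rs.map (fun d => (d.length : Int))).foldl max (a : Int)
      = ((rs.foldl (fun a d => max a d.length) a : Nat) : Int) := by
  induction rs generalizing a with
  | nil => simp
  | cons d rs ih => simp [List.foldl_cons, ← Nat.cast_max, ih]

theorem nfpWidth_eq (rows : List (List Char)) :
    ((PySem.List.max? (rows.map (fun d => (d.length : Int))) (fun x => x)).getD 0).toNat
      = nfpW rows := by
  cases rows with
  | nil => rfl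
  | cons d rs =>
    rw [List.map_cons, PySem.List.max?_id_cons, nfpCastFold]
    simp [nfpW]

theorem nfpInnerB_eq_table (rows : List (List Char)) :
    nfpInnerB rows = PySem.Dict.mk (nfpTable rows) := by
  unfold nfpInnerB nfpTable
  rw [nfpWidth_eq]

theorem nfpFoldMaxInit (rs : List (List Char)) :
    ∀ a : Nat, a ≤ rs.foldl (fun a d => max a d.length) a := by
  induction rs with
  | nil => intro a; simp
  | cons e rs ih =>
    intro a
    simp only [List.foldl_cons]
    exact le_trans (le_max_left _ _) (ih _)

theorem nfpFoldMaxMem (rs : List (List Char)) :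
    ∀ (a : Nat), ∀ d ∈ rs, d.length ≤ rs.foldl (fun a d => max a d.length) a := by
  induction rs with
  | nil => intro a d hd; simp at hd
  | cons e rs ih =>
    intro a d hd
    simp only [List.foldl_cons]
    rcases List.mem_cons.1 hd with rfl | h
    · exact le_trans (le_max_right _ _) (nfpFoldMaxInit rs _)
    · exact ih _ _ h

theorem nfpW_bound (rows : List (List Char)) : ∀ d ∈ rows, d.length ≤ nfpW rows :=
  nfpFoldMaxMem rows 0

theorem nfpFoldMaxLe (rs : List (List Char)) :
    ∀ a : Nat, (∀ d ∈ rs, d.length ≤ 3) → a ≤ 3 →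
      rs.foldl (fun a d => max a d.length) a ≤ 3 := by
  induction rs with
  | nil => intro a _ ha; simpa
  | cons e rs ih =>
    intro a h ha
    simp only [List.foldl_cons]
    exact ih _ (fun d hd => h d (List.mem_cons_of_mem _ hd))
      (max_le ha (h e List.mem_cons_self))

theorem nfpW_le3 (rows : List (List Char)) (h : ∀ d ∈ rows, d.length ≤ 3) : nfpW rows ≤ 3 :=
  nfpFoldMaxLe rows 0 h (by omega)

theorem nfpCol_append (rows rs : List (List Char)) (i : Nat) :
    nfpCol (rows ++ rs) i = nfpCol rows i ++ nfpCol rs i := by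
  simp [nfpCol]

theorem nfpCol_singleton (d : List Char) (i : Nat) :
    nfpCol [d] i = if i < d.length then [String.ofList [d.getD i ' ']] else [] := by
  by_cases h : i < d.length <;> simp [nfpCol, h]

theorem nfpCol_eq_nil (rows : List (List Char)) (i : Nat) (h : ∀ d ∈ rows, d.length ≤ i) :
    nfpCol rows i = [] := by
  simp only [nfpCol, List.map_eq_nil_iff, List.filter_eq_nil_iff]
  intro d hd
  simpa using h d hd

-- folding one row's d_map pairs into the table dict extends each column and appends new ones
theorem nfpFoldPairs (d : List Char) (hd : d.length ≤ 3) (w : Nat) (hw : w ≤ 3)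
    (rows : List (List Char)) (hcol : ∀ i, w ≤ i → nfpCol rows i = []) :
    (nfpPairs d).foldl (fun inn cv => inn.modify cv.1 [] (· ++ [cv.2]))
      (PySem.Dict.mk ((List.range w).map
        (fun (i : Nat) => (PySem.List.pyGetD nfpChars (i : Int) "", nfpCol rows i))))
    = PySem.Dict.mk ((List.range (max w d.length)).map
        (fun (i : Nat) => (PySem.List.pyGetD nfpChars (i : Int) "", nfpCol rows i ++ nfpCol [d] i))) := by
  match d, hd with
  | [], _ =>
    simp [nfpPairs, PySem.List.enumerate, nfpCol_singleton]
  | [a], _ =>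
    interval_cases w <;>
      simp [nfpPairs, nfpChars, PySem.List.enumerate_cons, List.range_succ, nfpCol_singleton,
        PySem.Dict.modify, PySem.Dict.insert, PySem.Dict.contains, PySem.Dict.getD,
        PySem.Dict.get?, PySem.List.pyGetD, hcol]
  | [a, b], _ =>
    interval_cases w <;>
      simp [nfpPairs, nfpChars, PySem.List.enumerate_cons, List.range_succ, nfpCol_singleton,
        PySem.Dict.modify, PySem.Dict.insert, PySem.Dict.contains, PySem.Dict.getD,
        PySem.Dict.get?, PySem.List.pyGetD, hcol]
  | [a, b, c], _ =>
    interval_cases w <;>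
      simp [nfpPairs, nfpChars, PySem.List.enumerate_cons, List.range_succ, nfpCol_singleton,
        PySem.Dict.modify, PySem.Dict.insert, PySem.Dict.contains, PySem.Dict.getD,
        PySem.Dict.get?, PySem.List.pyGetD, hcol]

theorem nfpInner_eq_table (rows : List (List Char)) (h : ∀ d ∈ rows, d.length ≤ 3) :
    nfpInner rows = PySem.Dict.mk (nfpTable rows) := by
  induction rows using List.reverseRecOn with
  | nil => rfl
  | append_singleton rows d ih =>
    have h' : ∀ d' ∈ rows, d'.length ≤ 3 := fun d' hd' => h d' (List.mem_append_left _ hd')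
    have hW : nfpW (rows ++ [d]) = max (nfpW rows) d.length := by
      simp [nfpW, List.foldl_append]
    rw [nfpInner_append, ih h']
    have htab : nfpTable (rows ++ [d])
        = (List.range (max (nfpW rows) d.length)).map
            (fun (i : Nat) => (PySem.List.pyGetD nfpChars (i : Int) "", nfpCol rows i ++ nfpCol [d] i)) := by
      unfold nfpTable
      rw [hW]
      exact List.map_congr_left (fun i _ => by rw [nfpCol_append])
    rw [htab]
    exact nfpFoldPairs d (h d (by simp)) (nfpW rows) (nfpW_le3 rows h')
      rows (fun i hi => nfpCol_eq_nil rows i (fun d' hd' => le_trans (nfpW_bound rows d' hd') hi))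

-- B's skip-if-seen insert loop, characterized
theorem nfpSkipFold (l : List (String × List Char)) (g : String → PySem.Dict String (List String))
    (S : List String) (hS : S.Nodup) :
    l.foldl (fun r td => if r.contains td.1 then r else r.insert td.1 (g td.1))
      (PySem.Dict.mk (S.map (fun k => (k, g k))))
    = PySem.Dict.mk ((PySem.Set.update S (l.map (·.1))).map (fun k => (k, g k))) := by
  induction l generalizing S hS with
  | nil => simp [PySem.Set.update]
  | cons td l ih =>
    rw [List.foldl_cons]
    have hc : (PySem.Dict.mk (S.map (fun k => (k, g k)))).contains td.1 = decide (td.1 ∈ S) := by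
      rw [PySem.Dict.contains_eq_decide_mem_keys]
      simp [PySem.Dict.keys]
    have hupd : PySem.Set.update S ((td :: l).map (·.1))
        = PySem.Set.update (PySem.Set.add S td.1) (l.map (·.1)) := by
      simp [PySem.Set.update]
    by_cases hm : td.1 ∈ S
    · have hadd : PySem.Set.add S td.1 = S := by simp [PySem.Set.add, hm]
      rw [hupd, hadd, hc]
      simpa [hm] using ih S hS
    · have hadd : PySem.Set.add S td.1 = S ++ [td.1] := by simp [PySem.Set.add, hm]
      have hins : (PySem.Dict.mk (S.map (fun k => (k, g k)))).insert td.1 (g td.1)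
          = PySem.Dict.mk ((S ++ [td.1]).map (fun k => (k, g k))) := by
        apply PySem.Dict.ext
        rw [PySem.Dict.items_insert_of_not_contains _ _ (by rw [hc]; simpa using hm)]
        simp
      have hSnext : (S ++ [td.1]).Nodup := by
        simp only [List.nodup_append, List.nodup_singleton, true_and]
        refine ⟨hS, ?_⟩
        intro a ha b hb
        simp only [List.mem_singleton] at hb
        subst hb
        exact fun h => hm (h ▸ ha)
      rw [hupd, hadd, hc]
      have hdm : decide (td.1 ∈ S) = false := by simpa using hm
      rw [hdm]
      simpa [hins] using ih (S ++ [td.1]) hSnext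

-- ===== VERDICT (by name: the statement is the Claim_ definition above) =====
theorem number_free_params_spec : Claim_equal_number_free_params := by
  intro all_params _ hpre
  unfold Spec_number_free_params number_free_params number_free_params_alt
  have hA := nfpFold_eq all_params (PySem.Dict.mk []) hpre
  conv_lhs => rw [show (PySem.Dict.mk [] : PySem.Dict String (PySem.Dict String (List String)))
        = nfpRender (PySem.Dict.mk []) from rfl, hA]
  have hbfold : all_params.foldl (fun b param =>
        b.modify (nfpParse param).1 [] (· ++ [(nfpParse param).2])) (PySem.Dict.mk [])
      = (all_params.map nfpParse).foldl (fun b p => b.modify p.1 [] (· ++ [p.2]))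
          (PySem.Dict.mk []) := by
    rw [List.foldl_map]
  rw [hbfold]
  set parsed := all_params.map nfpParse with hparsed
  set buckets := parsed.foldl (fun b p => b.modify p.1 [] (· ++ [p.2])) (PySem.Dict.mk [])
    with hbuckets
  have hnodup : buckets.keys.Nodup := by
    rw [hbuckets]
    exact PySem.Dict.nodup_keys_foldl_modify_key parsed (·.1) [] (fun _ p => (· ++ [p.2])) _
      (by simp [PySem.Dict.keys])
  have hkeys : buckets.keys = PySem.Set.ofList (parsed.map (·.1)) := by
    rw [hbuckets, PySem.Dict.keys_foldl_modify_key]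
    simp [PySem.Dict.keys, PySem.Set.update, PySem.Set.ofList_eq_foldl]
  have hval : ∀ k, buckets.getD k [] = (parsed.filter (fun p => p.1 == k)).map (·.2) := by
    intro k
    rw [hbuckets, PySem.Dict.getD_foldl_modify_append]
    simp [PySem.Dict.getD_eq_get?_getD, PySem.Dict.get?]
  have hlen : ∀ k, ∀ r ∈ (parsed.filter (fun p => p.1 == k)).map (·.2), r.length ≤ 3 := by
    intro k r hr
    simp only [List.mem_map, List.mem_filter] at hr
    obtain ⟨p, ⟨hp, _⟩, rfl⟩ := hr
    rw [hparsed] at hp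
    obtain ⟨q, hq, rfl⟩ := List.mem_map.1 hp
    show (nfpRaw q).2.length ≤ 3
    rw [nfpRaw, nfpRaw_snd q.toList ([], []), List.nil_append,
      ← List.countP_eq_length_filter]
    exact hpre q hq
  have hitemsA : (nfpRender buckets).items
      = (PySem.Set.ofList (parsed.map (·.1))).map
          (fun k => (k, nfpInner ((parsed.filter (fun p => p.1 == k)).map (·.2)))) := by
    show buckets.items.map (fun p => (p.1, nfpInner p.2)) = _
    rw [PySem.Dict.items_eq_map_keys buckets hnodup [], hkeys, List.map_map]
    exact List.map_congr_left (fun k _ => by simp [hval k])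
  have hB : parsed.foldl (fun r td => if r.contains td.1 then r
        else r.insert td.1 (nfpInnerB ((parsed.filter (fun p => p.1 == td.1)).map (·.2))))
        (PySem.Dict.mk [])
      = PySem.Dict.mk ((PySem.Set.ofList (parsed.map (·.1))).map
          (fun k => (k, nfpInnerB ((parsed.filter (fun p => p.1 == k)).map (·.2))))) := by
    have := nfpSkipFold parsed
      (fun k => nfpInnerB ((parsed.filter (fun p => p.1 == k)).map (·.2))) [] List.nodup_nil
    simpa [PySem.Set.update, PySem.Set.ofList_eq_foldl] using this
  dsimp only
  rw [hB, hitemsA]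
  simp only [List.map_map]
  refine List.map_congr_left (fun k _ => ?_)
  simp only [Function.comp_apply]
  rw [nfpInner_eq_table _ (hlen k), nfpInnerB_eq_table]
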